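-- pv_equiv track=rewrite | github.com/thedarkzeno/svg_geometry | symbolic/step_aggregator.py | _same_base_points
-- ===== SOURCE A (Python) =====
-- def _same_base_points(steps):
--     """
--     Verifica se os passos referem-se aos mesmos pontos base.
--     Por exemplo: coll(B, M, C), cong(B, M, M, C), perp(A, M, B, C)
--     todos referem-se a B, M, C (com A adicional no perp).
--     """
--     if len(steps) < 2:
--         return True
--
--     # Extrair pontos únicos de cada passo
--     points_sets = []
--     for step in steps:
--         if isinstance(step, tuple):
--             points = set(arg for arg in step[1:] if isinstance(arg, str))
--             points_sets.append(points)
--         else: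
--             return False
--
--     # Verificar se há sobreposição significativa (pelo menos 2 pontos em comum)
--     if len(points_sets) < 2:
--         return True
--
--     intersection = points_sets[0]
--     for ps in points_sets[1:]:
--         intersection = intersection & ps
--
--     # Se há pelo menos 2 pontos em comum, consideramos relacionados
--     return len(intersection) >= 2
-- ===== SOURCE B (Python) =====
-- def _same_base_points(steps):
--     # Counting re-implementation: one pass tallying, per step, each distinct point
--     # of step[1:]; a point is common to all steps iff its tally equals len(steps).
--     if len(steps) < 2:
--         return True
--     for step in steps:
--         if not isinstance(step, tuple):
--             return False
--     n = len(steps)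
--     counts = {}
--     for step in steps:
--         for p in set(arg for arg in step[1:] if isinstance(arg, str)):
--             counts[p] = counts.get(p, 0) + 1
--     return sum(1 for c in counts.values() if c == n) >= 2
-- ===== Notes on version B (the rewrite author's own statement) =====
-- stated objective: alternative
-- what changed: Replaces building a list of per-step sets and folding pairwise set intersections with a single counting dict (one tally per step per distinct point); a point is common iff its count equals len(steps), and B returns whether at least two points reach the full count.
import Mathlib
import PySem

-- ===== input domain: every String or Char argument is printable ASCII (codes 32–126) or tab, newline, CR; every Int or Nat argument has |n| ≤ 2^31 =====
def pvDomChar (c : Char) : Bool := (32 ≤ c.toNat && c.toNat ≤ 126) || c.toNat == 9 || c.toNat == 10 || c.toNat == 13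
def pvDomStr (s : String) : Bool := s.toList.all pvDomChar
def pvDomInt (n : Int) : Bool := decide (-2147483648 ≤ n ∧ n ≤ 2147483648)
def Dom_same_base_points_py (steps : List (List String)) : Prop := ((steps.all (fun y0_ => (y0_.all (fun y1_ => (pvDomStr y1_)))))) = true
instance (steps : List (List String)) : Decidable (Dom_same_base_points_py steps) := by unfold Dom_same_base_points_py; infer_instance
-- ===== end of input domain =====

-- B replaces A's list of per-step sets + fold of pairwise set intersections by a single
-- counting dict (one tally per step per distinct point of step[1:]); equal return values.
-- Under the type List (List String) every step IS a tuple of strings, so A's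
-- isinstance(step, tuple) / isinstance(arg, str) tests are identically true.

-- ===== PORT A =====
def same_base_points_py (steps : List (List String)) : Bool :=
  if steps.length < 2 then true
  else
    -- points_sets: one set per step, set(arg for arg in step[1:] if isinstance(arg, str))
    let pointsSets : List (PySem.Set String) :=
      steps.foldl (fun acc step =>
        acc ++ [PySem.Set.ofList (PySem.List.slice step (some 1) none)]) []
    if pointsSets.length < 2 then true
    else
      match pointsSets with
      | [] => true  -- unreachable: pointsSets has length ≥ 2 here
      | s0 :: rest =>
        decide ((2 : Int) ≤ PySem.Set.len
          (rest.foldl (fun acc ps => PySem.Set.inter acc ps) s0))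

-- ===== PORT B =====
def same_base_points_py_alt (steps : List (List String)) : Bool :=
  if steps.length < 2 then true
  else
    -- the 'return False if some step is not a tuple' loop is vacuous at this type
    let n : Int := steps.length
    let counts : PySem.Dict String Int :=
      steps.foldl (fun d step =>
        (PySem.Set.ofList (PySem.List.slice step (some 1) none)).foldl
          (fun d p => d.modify p 0 (· + 1)) d) PySem.Dict.empty
    decide (2 ≤ counts.values.countP (fun c => c == n))

-- ===== PRECONDITION & SPEC =====
def Spec_same_base_points_py (steps : List (List String)) (out : Bool) : Prop := out = same_base_points_py_alt steps
instance (steps : List (List String)) (out : Bool) : Decidable (Spec_same_base_points_py steps out) := by unfold Spec_same_base_points_py; infer_instance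

-- ===== CLAIM (what is proved, stated in full; the proofs are below) =====
def Claim_equal_same_base_points_py : Prop := ∀ (steps : List (List String)), Dom_same_base_points_py steps → Spec_same_base_points_py steps (same_base_points_py steps)

-- ===== LEMMAS AND PROOFS =====

/-- The per-step point set: set(step[1:]). -/
def pvPset (s : List String) : PySem.Set String :=
  PySem.Set.ofList (PySem.List.slice s (some 1) none)

/-- Final tally of a point v = number of steps whose point set contains v. -/
lemma pvCountsD (steps : List (List String)) (d : PySem.Dict String Int) (v : String) :
    (steps.foldl (fun d step =>
      (PySem.Set.ofList (PySem.List.slice step (some 1) none)).foldl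
        (fun d p => d.modify p 0 (· + 1)) d) d).getD v 0
    = d.getD v 0 + (steps.countP (fun s => decide (v ∈ pvPset s)) : Int) := by
  induction steps generalizing d with
  | nil => simp
  | cons s tl ih =>
    rw [List.foldl_cons, ih, PySem.Dict.getD_foldl_modify_add_one, List.countP_cons]
    have hps : PySem.Set.ofList (PySem.List.slice s (some 1) none) = pvPset s := rfl
    rw [hps]
    have hnd : (pvPset s).Nodup := PySem.Set.nodup_ofList _
    by_cases h : v ∈ pvPset s
    · rw [List.count_eq_one_of_mem hnd h]
      simp [h]; ring
    · rw [List.count_eq_zero_of_not_mem h]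
      simp [h]

/-- Keys of the final tally dict: the union (first occurrences) of all point sets. -/
lemma pvKeysFold (steps : List (List String)) (d : PySem.Dict String Int) :
    (steps.foldl (fun d step =>
      (PySem.Set.ofList (PySem.List.slice step (some 1) none)).foldl
        (fun d p => d.modify p 0 (· + 1)) d) d).keys
    = steps.foldl (fun K s => PySem.Set.update K (pvPset s)) d.keys := by
  induction steps generalizing d with
  | nil => rfl
  | cons s tl ih =>
    rw [List.foldl_cons, ih, PySem.Dict.keys_foldl_modify]
    rfl

lemma pvMemKeys (steps : List (List String)) (K0 : PySem.Set String)
    (hnd : K0.Nodup) :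
    (∀ v : String, v ∈ steps.foldl (fun K s => PySem.Set.update K (pvPset s)) K0 ↔
      v ∈ K0 ∨ ∃ s ∈ steps, v ∈ pvPset s)
    ∧ (steps.foldl (fun K s => PySem.Set.update K (pvPset s)) K0).Nodup := by
  induction steps generalizing K0 with
  | nil => simpa using hnd
  | cons s tl ih =>
    rw [List.foldl_cons]
    obtain ⟨hmem, hnd'⟩ := ih (PySem.Set.update K0 (pvPset s)) (PySem.Set.nodup_update _ _ hnd)
    refine ⟨fun v => ?_, hnd'⟩
    rw [hmem v, PySem.Set.mem_update]
    constructor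
    · rintro ((h | h) | ⟨t, ht, hv⟩)
      · exact Or.inl h
      · exact Or.inr ⟨s, by simp, h⟩
      · exact Or.inr ⟨t, by simp [ht], hv⟩
    · rintro (h | ⟨t, ht, hv⟩)
      · exact Or.inl (Or.inl h)
      · rcases List.mem_cons.mp ht with rfl | ht
        · exact Or.inl (Or.inr hv)
        · exact Or.inr ⟨t, ht, hv⟩

/-- A's fold of intersections is a filter of the first set. -/
lemma pvInterFold (rest : List (PySem.Set String)) (s0 : PySem.Set String) :
    rest.foldl (fun acc ps => PySem.Set.inter acc ps) s0
    = s0.filter (fun p => rest.all (fun ps => ps.contains p)) := by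
  induction rest generalizing s0 with
  | nil => simp
  | cons ps tl ih =>
    rw [List.foldl_cons, ih]
    show (List.filter _ (List.filter _ s0)) = _
    rw [List.filter_filter]
    refine List.filter_congr (fun x _ => ?_)
    simp [Bool.and_comm]

/-- Two nodup lists with the same members have the same length. -/
lemma pvLenEq {l₁ l₂ : List String} (h₁ : l₁.Nodup) (h₂ : l₂.Nodup)
    (h : ∀ x, x ∈ l₁ ↔ x ∈ l₂) : l₁.length = l₂.length :=
  ((List.perm_ext_iff_of_nodup h₁ h₂).mpr h).length_eq

-- ===== VERDICT (by name: the statement is the Claim_ definition above) =====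
theorem same_base_points_py_spec : Claim_equal_same_base_points_py := by
  intro steps _
  unfold Spec_same_base_points_py same_base_points_py same_base_points_py_alt
  by_cases hlen : steps.length < 2
  · simp [hlen]
  · simp only [hlen, if_false]
    rw [PySem.List.foldl_append_singleton_eq_map
      (fun step => PySem.Set.ofList (PySem.List.slice step (some 1) none)) steps []]
    simp only [List.nil_append, List.length_map, hlen, if_false]
    -- steps has length ≥ 2, so it is s0 :: rest
    match steps, hlen with
    | s0 :: rest, hlen =>
    simp only [List.map_cons]
    rw [pvInterFold]
    -- B side: values → keys → counts
    have hK := pvKeysFold (s0 :: rest) PySem.Dict.empty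
    have hke : (PySem.Dict.empty : PySem.Dict String Int).keys = [] := rfl
    rw [hke] at hK
    obtain ⟨hmemK, hndK⟩ := pvMemKeys (s0 :: rest) [] (List.nodup_nil)
    rw [← hK] at hmemK hndK
    set D : PySem.Dict String Int := (s0 :: rest).foldl (fun d step =>
      (PySem.Set.ofList (PySem.List.slice step (some 1) none)).foldl
        (fun d p => d.modify p 0 (· + 1)) d) PySem.Dict.empty with hD
    rw [PySem.Dict.values_eq_map_keys D hndK 0, List.countP_map]
    -- the B-side predicate: full count ↔ member of every step's set
    have hpred : ∀ k ∈ D.keys,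
        (((fun c => c == ((s0 :: rest).length : Int)) ∘ fun k => D.getD k 0) k = true ↔
          ((s0 :: rest).all fun s => decide (k ∈ pvPset s)) = true) := by
      intro k _
      have hEq : ((fun c => c == ((s0 :: rest).length : Int)) ∘ fun k => D.getD k 0) k
          = (s0 :: rest).all (fun s => decide (k ∈ pvPset s)) := by
        simp only [Function.comp_apply]
        rw [hD, pvCountsD]
        have hempty : (PySem.Dict.empty : PySem.Dict String Int).getD k 0 = 0 := rfl
        rw [hempty, zero_add]
        by_cases hall : ∀ s ∈ (s0 :: rest), k ∈ pvPset s
        · rw [List.countP_eq_length.mpr (by simpa using hall)]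
          have hR : ((s0 :: rest).all fun s => decide (k ∈ pvPset s)) = true := by
            simp only [List.all_eq_true, decide_eq_true_eq]; exact hall
          rw [hR]; simp
        · have hne : ¬ ((s0 :: rest).countP (fun s => decide (k ∈ pvPset s)) : Int)
              = ((s0 :: rest).length : Int) := by
            intro hc
            have h' := List.countP_eq_length.mp (by exact_mod_cast hc)
            exact hall (fun s hs => by simpa using h' s hs)
          have hL : (((s0 :: rest).countP (fun s => decide (k ∈ pvPset s)) : Int)
              == ((s0 :: rest).length : Int)) = false := by simpa using hne
          have hR : ((s0 :: rest).all fun s => decide (k ∈ pvPset s)) = false := by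
            push Not at hall
            obtain ⟨t, ht, hkt⟩ := hall
            simp only [List.all_eq_false]
            exact ⟨t, ht, by simpa using hkt⟩
          rw [hL, hR]
      rw [hEq]
    rw [List.countP_congr hpred, List.countP_eq_length_filter]
    -- A side as a filter length
    have hAset : PySem.Set.len (List.filter
        (fun p => (rest.map (fun step =>
          PySem.Set.ofList (PySem.List.slice step (some 1) none))).all
            (fun ps => ps.contains p)) (PySem.Set.ofList (PySem.List.slice s0 (some 1) none)))
        = ((List.filter (fun p => (rest.map (fun step =>
          PySem.Set.ofList (PySem.List.slice step (some 1) none))).all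
            (fun ps => ps.contains p)) (PySem.Set.ofList (PySem.List.slice s0 (some 1) none))).length : Int) := rfl
    rw [hAset]
    -- both filters have the same members: points in every step's set
    have hsame : (List.filter (fun p => (rest.map (fun step =>
          PySem.Set.ofList (PySem.List.slice step (some 1) none))).all
            (fun ps => ps.contains p)) (PySem.Set.ofList (PySem.List.slice s0 (some 1) none))).length
        = (List.filter (fun k => (s0 :: rest).all fun s => decide (k ∈ pvPset s)) D.keys).length := by
      apply pvLenEq ((PySem.Set.nodup_ofList _).filter _) (hndK.filter _)
      intro x
      simp only [List.mem_filter, List.all_map, List.all_eq_true, hmemK, List.mem_cons,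
        decide_eq_true_eq]
      constructor
      · rintro ⟨hx0, hall⟩
        have hx0' : x ∈ pvPset s0 := hx0
        refine ⟨Or.inr ⟨s0, Or.inl rfl, hx0'⟩, ?_⟩
        intro s hs
        rcases hs with rfl | hs
        · exact hx0'
        · have := hall s hs
          simpa [pvPset, PySem.Set.contains, List.contains_iff_mem] using this
      · rintro ⟨_, hall⟩
        have hx0 : x ∈ pvPset s0 := hall s0 (Or.inl rfl)
        refine ⟨hx0, fun s hs => ?_⟩
        have := hall s (Or.inr hs)
        simpa [pvPset, PySem.Set.contains, List.contains_iff_mem] using this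
    rw [hsame]
    simp
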